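-- pv_equiv track=rewrite | github.com/Pablo-Ali/Programacion_1_UTN | Clase_15_y_16_ejercicio_empleados.py/Funciones.py | ordenar_apellidos_unicos
-- ===== SOURCE A (Python) =====
-- def ordenar_apellidos_unicos(lista_empleados : list[dict]) -> list:
--     '''
--     '''
--
--     set_apellidos = set()
--
--     for empleado in lista_empleados:
--         apellido = empleado['apellido']
--         set_apellidos.add(apellido)
--
--     lista_retorno = list(set_apellidos)
--
--     lista_retorno.sort()
--
--     return lista_retorno
-- ===== SOURCE B (Python) =====
-- def ordenar_apellidos_unicos(lista_empleados : list[dict]) -> list: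
--     apellidos = [empleado['apellido'] for empleado in lista_empleados]
--     apellidos.sort()
--     resultado = []
--     for ap in apellidos:
--         if not resultado or resultado[-1] != ap:
--             resultado.append(ap)
--     return resultado
-- ===== Notes on version B (the rewrite author's own statement) =====
-- stated objective: alternative
-- what changed: Removed the set entirely: B collects all surnames with duplicates into a list, sorts it, and deduplicates in one linear pass by comparing each element with the last one appended (sorted adjacency), instead of maintaining a hash set and sorting its elements.
import Mathlib
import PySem

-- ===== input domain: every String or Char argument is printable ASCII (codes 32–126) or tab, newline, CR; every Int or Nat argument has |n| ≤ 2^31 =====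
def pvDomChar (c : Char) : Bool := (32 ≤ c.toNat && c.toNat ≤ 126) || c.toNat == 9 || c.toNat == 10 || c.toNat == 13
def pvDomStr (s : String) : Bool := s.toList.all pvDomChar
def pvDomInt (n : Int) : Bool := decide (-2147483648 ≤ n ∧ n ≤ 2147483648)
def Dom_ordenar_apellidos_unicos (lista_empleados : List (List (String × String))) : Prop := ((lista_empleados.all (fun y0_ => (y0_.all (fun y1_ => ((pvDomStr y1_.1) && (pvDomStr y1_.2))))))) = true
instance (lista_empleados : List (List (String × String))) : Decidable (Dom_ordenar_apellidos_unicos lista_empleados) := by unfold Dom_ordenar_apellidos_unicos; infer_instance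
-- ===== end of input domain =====

-- B replaces A's hash set with sort-then-adjacent-dedup (single linear pass, no set maintained);
-- objective: alternative (same O(n log n) cost, different data structure).

-- empleado['apellido'] on the association list (first match); total form — Pre_ guarantees the key exists.
def pvApellido (empleado : List (String × String)) : String :=
  (List.lookup "apellido" empleado).getD ""

-- ===== PORT A =====
def ordenar_apellidos_unicos (lista_empleados : List (List (String × String))) : List String :=
  let set_apellidos : PySem.Set String :=
    lista_empleados.foldl (fun s empleado => PySem.Set.add s (pvApellido empleado)) PySem.Set.empty
  let lista_retorno := set_apellidos
  PySem.List.sorted lista_retorno (fun x => x) false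

-- ===== PORT B =====
-- 'if not resultado or resultado[-1] != ap: resultado.append(ap)'
def pvAppendIfNew (resultado : List String) (ap : String) : List String :=
  if resultado.getLast? = some ap then resultado else resultado ++ [ap]

def ordenar_apellidos_unicos_alt (lista_empleados : List (List (String × String))) : List String :=
  let apellidos := lista_empleados.foldl (fun acc empleado => acc ++ [pvApellido empleado]) []
  let apellidos := PySem.List.sorted apellidos (fun x => x) false
  apellidos.foldl pvAppendIfNew []

-- ===== PRECONDITION & SPEC =====
-- Pre_ excludes exactly the inputs where some empleado lacks the 'apellido' key, on which Python A raises KeyError.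
def Pre_ordenar_apellidos_unicos (lista_empleados : List (List (String × String))) : Prop :=
  ∀ empleado ∈ lista_empleados, "apellido" ∈ empleado.map Prod.fst
instance (lista_empleados : List (List (String × String))) : Decidable (Pre_ordenar_apellidos_unicos lista_empleados) := by unfold Pre_ordenar_apellidos_unicos; infer_instance

def pvWitness_ordenar_apellidos_unicos : (List (List (String × String))) :=
  [[("apellido", "Diaz")], [("apellido", "Diaz")], [("apellido", "Acosta")]]

def Spec_ordenar_apellidos_unicos (lista_empleados : List (List (String × String))) (out : List String) : Prop := out = ordenar_apellidos_unicos_alt lista_empleados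
instance (lista_empleados : List (List (String × String))) (out : List String) : Decidable (Spec_ordenar_apellidos_unicos lista_empleados out) := by unfold Spec_ordenar_apellidos_unicos; infer_instance

-- ===== CLAIM (what is proved, stated in full; the proofs are below) =====
def Claim_equal_ordenar_apellidos_unicos : Prop := ∀ (lista_empleados : List (List (String × String))), Dom_ordenar_apellidos_unicos lista_empleados → Pre_ordenar_apellidos_unicos lista_empleados → Spec_ordenar_apellidos_unicos lista_empleados (ordenar_apellidos_unicos lista_empleados)

-- ===== LEMMAS AND PROOFS =====

-- the list B's dedup fold produces, as a structural recursion on the (sorted) input,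
-- carrying the last element appended so far
def pvUniq : List String → Option String → List String
  | [], _ => []
  | x :: xs, prev => if prev = some x then pvUniq xs prev else x :: pvUniq xs (some x)

lemma foldl_appendIfNew_eq_uniq (l : List String) (acc : List String) :
    l.foldl pvAppendIfNew acc = acc ++ pvUniq l acc.getLast? := by
  induction l generalizing acc with
  | nil => simp [pvUniq]
  | cons x xs ih =>
    by_cases h : acc.getLast? = some x
    · have hs : pvAppendIfNew acc x = acc := by simp [pvAppendIfNew, h]
      rw [List.foldl_cons, hs, ih, pvUniq, if_pos h]
    · have hs : pvAppendIfNew acc x = acc ++ [x] := by simp [pvAppendIfNew, h]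
      rw [List.foldl_cons, hs, ih, List.getLast?_concat, pvUniq, if_neg h]
      simp

lemma uniq_spec (l : List String) (prev : Option String)
    (hp : l.Pairwise (· ≤ ·))
    (hprev : ∀ a, prev = some a → ∀ b ∈ l, a ≤ b) :
    (pvUniq l prev).Pairwise (· < ·) ∧ ∀ y, (y ∈ pvUniq l prev ↔ y ∈ l ∧ prev ≠ some y) := by
  induction l generalizing prev with
  | nil => simp [pvUniq]
  | cons x xs ih =>
    obtain ⟨hx, hxs⟩ := List.pairwise_cons.mp hp
    by_cases h : prev = some x
    · rw [pvUniq, if_pos h]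
      obtain ⟨p, m⟩ := ih prev hxs
        (fun a ha b hb => hprev a ha b (List.mem_cons_of_mem _ hb))
      refine ⟨p, fun y => ?_⟩
      rw [m y]
      constructor
      · rintro ⟨hy, hne⟩; exact ⟨List.mem_cons_of_mem _ hy, hne⟩
      · rintro ⟨hy, hne⟩
        rcases List.mem_cons.mp hy with rfl | hy
        · exact absurd h hne
        · exact ⟨hy, hne⟩
    · rw [pvUniq, if_neg h]
      obtain ⟨p, m⟩ := ih (some x) hxs
        (fun a ha b hb => by cases ha; exact hx b hb)
      constructor
      · refine List.pairwise_cons.mpr ⟨fun y hy => ?_, p⟩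
        obtain ⟨hyxs, hne⟩ := (m y).mp hy
        exact lt_of_le_of_ne (hx y hyxs) (fun e => hne (by rw [e]))
      · intro y
        constructor
        · intro hy
          rcases List.mem_cons.mp hy with rfl | hy
          · exact ⟨List.mem_cons_self, fun e => h (by rw [e])⟩
          · obtain ⟨hyxs, _⟩ := (m y).mp hy
            refine ⟨List.mem_cons_of_mem _ hyxs, fun e => ?_⟩
            have h1 : y ≤ x := hprev y e x List.mem_cons_self
            have h2 : x < y := by
              obtain ⟨hyxs', hne⟩ := (m y).mp hy
              exact lt_of_le_of_ne (hx y hyxs') (fun e2 => hne (by rw [e2]))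
            exact absurd h1 (not_le.mpr h2)
        · rintro ⟨hy, hne⟩
          rcases List.mem_cons.mp hy with rfl | hy
          · exact List.mem_cons_self
          · by_cases hyx : y = x
            · subst hyx; exact List.mem_cons_self
            · exact List.mem_cons_of_mem _ (((m y).mpr ⟨hy, fun e => hyx (Option.some.inj e).symm⟩))

-- the heart of the equivalence: sorting the set equals adjacent-dedup of the sorted multiset
lemma sorted_set_eq_dedup_sorted (xs : List String) :
    PySem.List.sorted (PySem.Set.ofList xs) (fun x => x) false
      = (PySem.List.sorted xs (fun x => x) false).foldl pvAppendIfNew [] := by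
  rw [foldl_appendIfNew_eq_uniq, List.nil_append]
  have hp : (PySem.List.sorted xs (fun x => x) false).Pairwise (· ≤ ·) :=
    PySem.List.sorted_pairwise xs (fun x => x)
  obtain ⟨plt, pmem⟩ := uniq_spec _ (List.getLast? ([] : List String)) hp (by simp)
  apply PySem.List.sorted_eq_of_perm_of_pairwise_lt
  · rw [List.perm_ext_iff_of_nodup (List.Pairwise.nodup plt) (PySem.Set.nodup_ofList xs)]
    intro y
    rw [PySem.Set.mem_ofList, pmem y]
    simp [PySem.List.mem_sorted]
  · exact plt

-- ===== VERDICT (by name: the statement is the Claim_ definition above) =====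
theorem ordenar_apellidos_unicos_spec : Claim_equal_ordenar_apellidos_unicos := by
  intro l _ _
  show ordenar_apellidos_unicos l = ordenar_apellidos_unicos_alt l
  unfold ordenar_apellidos_unicos ordenar_apellidos_unicos_alt
  rw [PySem.List.foldl_append_singleton_eq_map, List.nil_append,
    show l.foldl (fun s empleado => PySem.Set.add s (pvApellido empleado)) PySem.Set.empty
        = PySem.Set.ofList (l.map pvApellido) from by
      rw [PySem.Set.ofList_eq_foldl, List.foldl_map]; rfl]
  exact sorted_set_eq_dedup_sorted (l.map pvApellido)
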